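-- pv_equiv track=rewrite | github.com/MarcBejjani/IDPA_Project | StructureQueryHelper.py | normalizeDoc
-- ===== SOURCE A (Python) =====
-- def normalizeDoc(matrixA, matrixB):
--     newA = matrixA
--     newB = matrixB
--
--     for nodeB in newB:
--         if nodeB not in newA:
--             newA[nodeB] = 0
--     for nodeA in newA:
--         if nodeA not in newB:
--             newB[nodeA] = 0
--     return newA, newB
-- ===== SOURCE B (Python) =====
-- def normalizeDoc(matrixA, matrixB):
--     # Pure rebuild: dedup-concatenated key order + lookup-with-default, returning fresh dicts
--     # (return-value equivalence only: A mutates its arguments in place, B does not).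
--     orderA = dict.fromkeys([*matrixA, *matrixB])
--     orderB = dict.fromkeys([*matrixB, *matrixA])
--     return ({k: matrixA.get(k, 0) for k in orderA},
--             {k: matrixB.get(k, 0) for k in orderB})
-- ===== Notes on version B (the rewrite author's own statement) =====
-- stated objective: alternative
-- what changed: Replaces A's two in-place conditional-insert fill loops with a pure rebuild: compute each output's key order once by dict.fromkeys-dedup of the concatenated key lists, then construct both result dicts fresh via get(k, 0) lookups (return value identical; A mutates its arguments, B does not).
import Mathlib
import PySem

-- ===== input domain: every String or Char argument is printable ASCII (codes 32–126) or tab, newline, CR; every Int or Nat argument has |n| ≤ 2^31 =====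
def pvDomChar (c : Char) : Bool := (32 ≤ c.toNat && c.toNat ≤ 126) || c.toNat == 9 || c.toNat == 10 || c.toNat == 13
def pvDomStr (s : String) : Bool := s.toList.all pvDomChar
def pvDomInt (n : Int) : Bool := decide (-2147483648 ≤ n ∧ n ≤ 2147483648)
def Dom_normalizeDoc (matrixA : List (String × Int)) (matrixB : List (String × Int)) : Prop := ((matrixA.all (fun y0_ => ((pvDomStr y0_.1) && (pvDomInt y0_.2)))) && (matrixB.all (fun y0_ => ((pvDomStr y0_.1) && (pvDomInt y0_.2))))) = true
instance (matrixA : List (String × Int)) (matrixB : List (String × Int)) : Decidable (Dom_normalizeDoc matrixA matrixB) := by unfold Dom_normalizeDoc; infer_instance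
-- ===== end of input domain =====

-- B rebuilds both result dicts fresh from a dedup-of-concatenation key order with get(k, 0) lookups
-- instead of A's two in-place conditional-insert fill loops; equivalence is about the RETURN value only
-- (the Python A mutates its argument dicts in place, B does not).

-- ===== PORT A =====
-- A: for nodeB in newB: if nodeB not in newA: newA[nodeB] = 0 ; then symmetrically (loops iterate keys).
def normalizeDoc (matrixA : List (String × Int)) (matrixB : List (String × Int)) : (List (String × Int)) × (List (String × Int)) :=
  let newA : PySem.Dict String Int :=
    (PySem.Dict.ofList matrixB).keys.foldl
      (fun d k => if d.contains k then d else d.insert k 0) (PySem.Dict.ofList matrixA)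
  let newB : PySem.Dict String Int :=
    newA.keys.foldl
      (fun d k => if d.contains k then d else d.insert k 0) (PySem.Dict.ofList matrixB)
  (newA.items, newB.items)

-- ===== PORT B =====
-- B: orderX = dict.fromkeys([*matrixX, *matrixY]) (= PySem.List.dedup of the concatenated key lists),
--    then {k: matrixX.get(k, 0) for k in orderX} (a dict comprehension = fold of insert over the keys).
def normalizeDoc_alt (matrixA : List (String × Int)) (matrixB : List (String × Int)) : (List (String × Int)) × (List (String × Int)) :=
  let dA : PySem.Dict String Int := PySem.Dict.ofList matrixA
  let dB : PySem.Dict String Int := PySem.Dict.ofList matrixB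
  let orderA := PySem.List.dedup (dA.keys ++ dB.keys)
  let orderB := PySem.List.dedup (dB.keys ++ dA.keys)
  ((orderA.foldl (fun e k => e.insert k (dA.getD k 0)) PySem.Dict.empty).items,
   (orderB.foldl (fun e k => e.insert k (dB.getD k 0)) PySem.Dict.empty).items)

-- ===== PRECONDITION & SPEC =====
def Spec_normalizeDoc (matrixA : List (String × Int)) (matrixB : List (String × Int)) (out : (List (String × Int)) × (List (String × Int))) : Prop := out = normalizeDoc_alt matrixA matrixB
instance (matrixA : List (String × Int)) (matrixB : List (String × Int)) (out : (List (String × Int)) × (List (String × Int))) : Decidable (Spec_normalizeDoc matrixA matrixB out) := by unfold Spec_normalizeDoc; infer_instance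

-- ===== CLAIM (what is proved, stated in full; the proofs are below) =====
def Claim_equal_normalizeDoc : Prop := ∀ (matrixA : List (String × Int)) (matrixB : List (String × Int)), Dom_normalizeDoc matrixA matrixB → Spec_normalizeDoc matrixA matrixB (normalizeDoc matrixA matrixB)

-- ===== LEMMAS AND PROOFS =====

-- A's fill-in loop body: add key k with value 0 if absent
def addM (d : PySem.Dict String Int) (ks : List String) : PySem.Dict String Int :=
  ks.foldl (fun d k => if d.contains k then d else d.insert k 0) d

theorem addM_cons (d : PySem.Dict String Int) (k : String) (ks : List String) :
    addM d (k :: ks) = addM (if d.contains k then d else d.insert k 0) ks := rfl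

theorem addM_append (d : PySem.Dict String Int) (xs ys : List String) :
    addM d (xs ++ ys) = addM (addM d xs) ys := List.foldl_append

theorem addM_of_contains (ks : List String) (d : PySem.Dict String Int)
    (h : ∀ k ∈ ks, d.contains k = true) : addM d ks = d := by
  induction ks with
  | nil => rfl
  | cons k ks ih =>
    rw [addM_cons, h k (by simp)]
    exact ih (fun x hx => h x (by simp [hx]))

theorem contains_addM (ks : List String) (d : PySem.Dict String Int) (k : String)
    (h : d.contains k = true) : (addM d ks).contains k = true := by
  induction ks generalizing d with
  | nil => exact h
  | cons x ks ih =>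
    rw [addM_cons]
    by_cases hx : d.contains x = true
    · rw [if_pos hx]; exact ih d h
    · rw [if_neg hx]
      exact ih _ (by rw [PySem.Dict.contains_insert, h]; simp)

theorem keys_addM (ks : List String) (d : PySem.Dict String Int) :
    (addM d ks).keys = PySem.Set.update d.keys ks := by
  induction ks generalizing d with
  | nil => rfl
  | cons k ks ih =>
    rw [addM_cons, PySem.Set.update, List.foldl_cons, ← PySem.Set.update]
    by_cases h : d.contains k = true
    · have hmem : PySem.Set.contains d.keys k = true := by
        rw [PySem.Dict.contains_eq_decide_mem_keys] at h
        simpa [PySem.Set.contains] using h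
      rw [h, if_pos rfl, ih, PySem.Set.add, if_pos hmem]
    · have h' : d.contains k = false := by simpa using h
      have hmem : PySem.Set.contains d.keys k = false := by
        rw [PySem.Dict.contains_eq_decide_mem_keys] at h'
        simpa [PySem.Set.contains] using h'
      rw [h', if_neg (by simp), ih, PySem.Set.add, if_neg (by simpa [PySem.Set.contains] using hmem),
        PySem.Dict.keys_insert_of_not_contains d 0 h']

-- the genuinely new keys that Set.update appends on top of `seen`
def newKeys (seen : List String) : List String → List String
  | [] => []
  | k :: ks => if PySem.Set.contains seen k then newKeys seen ks else k :: newKeys (seen ++ [k]) ks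

theorem update_eq_append_newKeys (ks : List String) (seen : List String) :
    PySem.Set.update seen ks = seen ++ newKeys seen ks := by
  induction ks generalizing seen with
  | nil => simp [PySem.Set.update, newKeys]
  | cons k ks ih =>
    rw [PySem.Set.update, List.foldl_cons, ← PySem.Set.update, newKeys]
    by_cases h : PySem.Set.contains seen k = true
    · rw [PySem.Set.add, if_pos h, if_pos h, ih]
    · have h' : PySem.Set.contains seen k = false := by simpa using h
      rw [PySem.Set.add, if_neg (by simpa [PySem.Set.contains] using h'), if_neg (by simpa [PySem.Set.contains] using h'), ih (seen ++ [k])]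
      simp

theorem newKeys_subset (ks seen : List String) (x : String) (hx : x ∈ newKeys seen ks) : x ∈ ks := by
  induction ks generalizing seen with
  | nil => simp [newKeys] at hx
  | cons k ks ih =>
    rw [newKeys] at hx
    by_cases h : PySem.Set.contains seen k = true
    · rw [if_pos h] at hx; exact List.mem_cons_of_mem _ (ih seen hx)
    · rw [if_neg h] at hx
      rcases List.mem_cons.mp hx with h1 | h2
      · simp [h1]
      · exact List.mem_cons_of_mem _ (ih (seen ++ [k]) h2)

theorem newKeys_fresh (ks seen : List String) (x : String) (hx : x ∈ newKeys seen ks) : x ∉ seen := by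
  induction ks generalizing seen with
  | nil => simp [newKeys] at hx
  | cons k ks ih =>
    rw [newKeys] at hx
    by_cases h : PySem.Set.contains seen k = true
    · rw [if_pos h] at hx; exact ih seen hx
    · rw [if_neg h] at hx
      rcases List.mem_cons.mp hx with h1 | h2
      · subst h1
        intro hmem
        exact absurd ((PySem.Set.contains_iff seen x).mpr hmem) (by simpa using h)
      · intro hmem
        exact ih (seen ++ [k]) h2 (by simp [hmem])

theorem newKeys_nodup (ks seen : List String) : (newKeys seen ks).Nodup := by
  induction ks generalizing seen with
  | nil => simp [newKeys]
  | cons k ks ih =>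
    rw [newKeys]
    by_cases h : PySem.Set.contains seen k = true
    · rw [if_pos h]; exact ih seen
    · rw [if_neg h]
      refine List.nodup_cons.mpr ⟨fun hmem => ?_, ih (seen ++ [k])⟩
      exact newKeys_fresh ks (seen ++ [k]) k hmem (by simp)

-- on fresh, duplicate-free keys A's conditional insert is an unconditional insert of 0
theorem addM_fresh_foldl (l : List String) (d : PySem.Dict String Int)
    (hf : ∀ k ∈ l, d.contains k = false) (hnd : l.Nodup) :
    addM d l = l.foldl (fun e k => e.insert k 0) d := by
  induction l generalizing d with
  | nil => rfl
  | cons k l ih =>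
    rw [addM_cons, hf k (by simp), if_neg (by simp), List.foldl_cons]
    refine ih (d.insert k 0) (fun x hx => ?_) (List.nodup_cons.mp hnd).2
    rw [PySem.Dict.contains_insert, hf x (by simp [hx])]
    have : x ≠ k := fun he => (List.nodup_cons.mp hnd).1 (he ▸ hx)
    simp [this]

-- rebuilding a dict over its own key list from empty returns the same dict
theorem rebuild_keys (d : PySem.Dict String Int) (hnd : d.keys.Nodup) :
    d.keys.foldl (fun e k => e.insert k (d.getD k 0)) PySem.Dict.empty = d := by
  apply PySem.Dict.ext
  have h := PySem.Dict.items_foldl_insert_fresh (l := d.keys) (d := PySem.Dict.empty)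
      (k := fun x => x) (v := fun a => d.getD a 0)
      (fun a _ => PySem.Dict.contains_empty a) (by simpa using hnd)
  rw [h, show PySem.Dict.empty.items = ([] : List (String × Int)) from rfl,
    List.nil_append, ← PySem.Dict.items_eq_map_keys d hnd 0]

-- addM over the new keys only equals addM over the whole list
theorem addM_newKeys (ks : List String) (d : PySem.Dict String Int) :
    addM d (newKeys d.keys ks) = addM d ks := by
  induction ks generalizing d with
  | nil => rfl
  | cons k ks ih =>
    rw [newKeys, addM_cons]
    by_cases h : d.contains k = true
    · have hmem : PySem.Set.contains d.keys k = true := by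
        rw [PySem.Dict.contains_eq_decide_mem_keys] at h
        simpa [PySem.Set.contains] using h
      rw [if_pos hmem, ih, h, if_pos rfl]
    · have h' : d.contains k = false := by simpa using h
      have hmem : PySem.Set.contains d.keys k = false := by
        rw [PySem.Dict.contains_eq_decide_mem_keys] at h'
        simpa [PySem.Set.contains] using h'
      rw [if_neg (by simpa [PySem.Set.contains] using hmem), addM_cons, h', if_neg (by simp),
        ← PySem.Dict.keys_insert_of_not_contains d 0 h']
      exact ih (d.insert k 0)

-- the core equation: B's pure rebuild over dedup(d.keys ++ ks) equals A's fill-in loop over ks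
theorem rebuild_eq_addM (d : PySem.Dict String Int) (hnd : d.keys.Nodup) (ks : List String) :
    (PySem.List.dedup (d.keys ++ ks)).foldl (fun e k => e.insert k (d.getD k 0)) PySem.Dict.empty
      = addM d ks := by
  rw [PySem.List.dedup_eq_ofList, PySem.Set.ofList_append,
    PySem.Set.ofList_eq_self_of_nodup d.keys hnd, update_eq_append_newKeys, List.foldl_append,
    rebuild_keys d hnd]
  have hfresh : ∀ k ∈ newKeys d.keys ks, d.contains k = false := by
    intro k hk
    rw [PySem.Dict.contains_eq_decide_mem_keys]
    simpa using newKeys_fresh ks d.keys k hk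
  have hzero : (newKeys d.keys ks).foldl (fun e k => e.insert k (d.getD k 0)) d
      = (newKeys d.keys ks).foldl (fun e k => e.insert k 0) d := by
    apply PySem.List.foldl_congr_mem
    intro e k hk
    rw [PySem.Dict.getD_of_not_contains d 0 (hfresh k hk)]
  rw [hzero, ← addM_fresh_foldl _ d hfresh (newKeys_nodup ks d.keys)]
  exact addM_newKeys ks d

-- ===== VERDICT (by name: the statement is the Claim_ definition above) =====
theorem normalizeDoc_spec : Claim_equal_normalizeDoc := by
  intro mA mB _
  unfold Spec_normalizeDoc normalizeDoc normalizeDoc_alt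
  have hA : (PySem.Dict.ofList mA).keys.Nodup := PySem.Dict.nodup_keys_ofList mA
  have hB : (PySem.Dict.ofList mB).keys.Nodup := PySem.Dict.nodup_keys_ofList mB
  show ((addM (PySem.Dict.ofList mA) (PySem.Dict.ofList mB).keys).items,
        (addM (PySem.Dict.ofList mB) (addM (PySem.Dict.ofList mA) (PySem.Dict.ofList mB).keys).keys).items)
      = (((PySem.List.dedup ((PySem.Dict.ofList mA).keys ++ (PySem.Dict.ofList mB).keys)).foldl
            (fun e k => e.insert k ((PySem.Dict.ofList mA).getD k 0)) PySem.Dict.empty).items,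
         ((PySem.List.dedup ((PySem.Dict.ofList mB).keys ++ (PySem.Dict.ofList mA).keys)).foldl
            (fun e k => e.insert k ((PySem.Dict.ofList mB).getD k 0)) PySem.Dict.empty).items)
  rw [rebuild_eq_addM (PySem.Dict.ofList mA) hA (PySem.Dict.ofList mB).keys,
    rebuild_eq_addM (PySem.Dict.ofList mB) hB (PySem.Dict.ofList mA).keys]
  rw [keys_addM, update_eq_append_newKeys, addM_append]
  rw [addM_of_contains _ _ (fun k hk => contains_addM _ _ _
    (by rw [PySem.Dict.contains_eq_decide_mem_keys]
        simpa using newKeys_subset _ _ k hk))]
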